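/- GENERATED by tools/from_farm_form.py from prooffarm-gif/accepted/mem_read/Lemmas.lean (a worked proof of the farm's unit `mem_read`,
   accepted by the verdict) — do not edit. -/
import Gif.Spec.Units.mem_read
import Gif.Spec.ForestCarry

/-!
  Lemmas for the unit `mem_read` (0x105c60, 44 instructions; gif_driver.c:42-58): the driver's reader.

  Part 1 (pure, no machine steps): the count as a number; where the buffer is (off the cursor, above the input); the common
  postcondition `Back` from the function's footprint and the new `CursorOK`.

  Part 2: the walk, cut at the returned state of `memcpy` (Proof.lean chains the two pieces):

      mr_seg_entry   0x105c60 → ret4, or → after the `ret`    the three checked loads, `count = min(len, end − cur)`;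
                                                               `count == 0`: the epilogue at once (`k = 0`); otherwise `call memcpy`
      mr_seg_ret4    ret4 → after the `ret`                    the checked `c->cur += count`, `return (int) count`, the epilogue
-/

open X86 X86.User Asan ProgX.Base ProgX.Base.Spec Gif.Spec

set_option maxRecDepth 4000
set_option maxHeartbeats 4000000

namespace Gif.Spec.mem_read

/-! ### Part 1: pure facts -/

/-- A 32-bit value below `2 ^ 31` has no sign bit (`test ebx, ebx ; jle` of a length `1 ≤ n < 2 ^ 31`). -/
theorem mr_msb (x : BitVec 32) (h : x.toNat < 2 ^ 31) : x.msb = false := by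
  rw [BitVec.msb_eq_decide]
  simp only [decide_eq_false_iff_not]
  omega

/-- **`movsxd rbx, ebx` of a length below `2 ^ 31`**: the sign extension of a 32-bit value without its top bit is that value. -/
theorem mr_sext (x : BitVec 32) (h : x.toNat < 2 ^ 31) : (BitVec.signExtend 64 x).toNat = x.toNat := by
  have hmsb : x.msb = false := mr_msb x h
  rw [BitVec.toNat_signExtend, hmsb]
  simp only [BitVec.toNat_setWidth, Bool.false_eq_true, if_false]
  omega

/-- **A loose window does not meet the cursor** (the cursor is a stack object, every other kind of loose window lies in the heap;
a gap misses it by definition). -/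
theorem mr_loose_off_cursor {H : Heap} {F : Forest} {R : Rd} {mem : Mem} {w : Span} (hok : GifOK H F R mem)
    (hheap : HeapOK H mem) (hcur : 0x700000 ≤ R.cur ∧ R.cur + 16 ≤ 0x800000) (hl : Loose H F R w) :
    w.hi ≤ R.cur ∨ R.cur + 16 ≤ w.lo := by
  have G := carry_Geo.intro hok.shape (hok.owns.placed hheap) hheap hcur
  have hoff : carry_Off F R True True True True True w := carry_Off.of_loose G hl
  exact hoff.cursor trivial

/-- A 64-bit value zero-extended into a register is that value. -/
theorem mr_toNat_ofBV64 (x : BitVec 64) : (Word.ofBV x).toNat = x.toNat := by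
  unfold Word.ofBV
  simp only [UInt64.toNat_ofBitVec, BitVec.toNat_setWidth]
  omega

/-- **`add [rbp], r12`**: the stored value `cur + count`, as a number (no wrap: `cur + count ≤ end < 2 ^ 64`). -/
theorem mr_add_val (c : Nat) (x : Word) (h : c + x.toNat < 2 ^ 64) : (BitVec.ofNat 64 c + x.toBitVec).toNat = c + x.toNat := by
  rw [BitVec.toNat_add, BitVec.toNat_ofNat, UInt64.toNat_toBitVec]
  omega

/-- **The common postcondition from the function's footprint**: no shadow byte written; the memory changed in the 128 bytes of
stack, the caller's buffer (loose, a heap window) and `[R.cur, R.cur + 8)`; the cursor lies in the input again; the reader did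
not go back. The heap's invariant by `HeapInv.sameExcept`, the shape by `Shape.set_cursor`. -/
theorem mr_back {H : Heap} {rest : List Obj} {frames : List (Nat × FrameLayout)} {F : Forest} {R : Rd} {u v : State} {n : Nat}
    (henv : Env H rest frames F R u) (hbuf : BufOK H rest frames F R (u.reg .rsi).toNat n)
    (hroom : 0x700000 + 128 ≤ (u.reg .rsp).toNat) (hun : ShadowUntouched u.mem v.mem)
    (hs : Mem.SameExcept [⟨(u.reg .rsp).toNat - 128, (u.reg .rsp).toNat⟩,
      ⟨(u.reg .rsi).toNat, (u.reg .rsi).toNat + n⟩, ⟨R.cur, R.cur + 8⟩] u.mem v.mem)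
    (hc : CursorOK R v.mem) (hrem : rem R v.mem ≤ rem R u.mem) : Back H rest frames F R u v := by
  have hp := henv.heap
  have hcur := henv.ctx.cursor_range hp.inv.shadow
  have hbase := hp.base
  have hhi := hp.inv.shadow.stack.hi
  refine ⟨?_, ⟨henv.ok.owns, ?_⟩, hrem⟩
  · -- the heap's invariant: every window is off the heap's region or inside one object
    refine hp.inv.sameExcept hun hs ?_
    intro w hw
    rcases List.mem_cons.mp hw with rfl | hw
    · left
      left
      simp only
      omega
    · rcases List.mem_cons.mp hw with rfl | hw
      · exact hbuf.win
      · have e : w = ⟨R.cur, R.cur + 8⟩ := List.mem_singleton.mp hw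
        subst e
        left
        left
        simp only
        omega
  · -- the shape: the stack and the buffer are loose, the third window is the cursor's `cur`
    refine henv.ok.shape.set_cursor (henv.ok.owns.placed hp.inv.heap) hp.inv.heap ⟨hcur.1, hcur.2.1⟩ hs ?_ hc
    intro w hw
    rcases List.mem_cons.mp hw with rfl | hw
    · left
      exact Loose.stack hp.inv.heap (by simp only; omega) (by simp only; omega) (by simp only; omega)
    · rcases List.mem_cons.mp hw with rfl | hw
      · left
        exact hbuf.loose
      · have e : w = ⟨R.cur, R.cur + 8⟩ := List.mem_singleton.mp hw
        subst e
        right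
        exact ⟨Nat.le_refl _, Nat.le_refl _⟩

/-- **The precondition of `memcpy(buf, c->cur, k)`**, `1 ≤ k ≤ min(n, rem)`, at a state `s` of the function whose stores so far
went to its stack only: the shadow clause under the lower stack pointer; the source `[cur, cur + k)` is input (`CursorOK`:
`inB ≤ cur`, `cur + k ≤ end = inB + inN`; `Ctx.input_live`); the destination is the head of the caller's buffer (`LiveIn.sub`); the
input lies below 700000H (`Ctx.input_range`: off the stack region, off the heap's region `[800000H, C00000H)`, below C00000H) and the
buffer at or above it (`BufOK.high`): the two ranges do not meet. -/
theorem mr_memcpy_pre {H : Heap} {rest : List Obj} {frames : List (Nat × FrameLayout)} {F : Forest} {R : Rd} {u s : State}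
    {n k : Nat} (henv : Env H rest frames F R u) (hbuf : BufOK H rest frames F R (u.reg .rsi).toNat n)
    (hun : ShadowUntouched u.mem s.mem) (hle : (s.reg .rsp).toNat ≤ (u.reg .rsp).toNat)
    (h8 : (s.reg .rsp).toNat % 8 = 0) (hlo : 0x700000 ≤ (s.reg .rsp).toNat + 8)
    (hrsi : (s.reg .rsi).toNat = mem_cursor.cur u.mem R.cur) (hrdi : s.reg .rdi = u.reg .rsi)
    (hrdx : (s.reg .rdx).toNat = k) (hk1 : 1 ≤ k) (hkn : k ≤ n) (hkr : k ≤ rem R u.mem) :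
    (memcpy.spec (H.liveObjs ++ rest) frames).pre s := by
  have hp := henv.heap
  have hbase := hp.base
  have hlimit := hp.limit
  obtain ⟨hc1, hc2, hc3⟩ := henv.ok.shape.cursor
  unfold rem at hkr
  have hpos : 0 < R.inN := by omega
  have hin := henv.ctx.input_range hp.inv hpos
  rw [hbase, hlimit] at hin
  have hhigh := hbuf.high
  refine ⟨hp.shadowPre.callee hun hle h8 hlo, Or.inr ⟨?_, ?_, ?_⟩⟩
  · -- the source: `k` bytes of input at the cursor
    rw [hrsi, hrdx]
    exact henv.ctx.input_live H frames hpos hc1 (by omega)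
  · -- the destination: the first `k` bytes of the buffer
    rw [hrdi, hrdx]
    exact hbuf.live.sub _ _ (Nat.le_refl _) (by omega)
  · -- no overlap: the input ends at or below 700000H, the buffer starts there or above
    rw [hrsi, hrdx, hrdi]
    right
    omega

/-! ### The assertion at the cut point -/

/-- **At 0x105cce (ret4), `memcpy(buf, c->cur, count)` has returned** (gif_driver.c:54): `k = count ≥ 1` is `min(len, end − cur)`;
`rbp = c`, `r12 = count`; `r14`, `r15` untouched; the four saved registers and the return address in their stack slots; so far the
memory changed in the 128 bytes of stack and in the buffer; no shadow byte was written; the text, DF and the MXCSR masks. `u` is the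
state at the function's entry. -/
structure MrMid (F : Forest) (R : Rd) (n : Nat) (u₀ u : State) (ret : Word) (k : Nat) (v : State) : Prop where
  rip : v.rip = Gif.L.mem_read.ret4
  /-- the body's stack pointer: four pushes and `sub rsp, 8` -/
  rsp : v.reg .rsp = u.reg .rsp - 40
  /-- `c = gif->UserData` -/
  rbp : v.reg .rbp = UInt64.ofNat R.cur
  /-- `count` -/
  r12 : (v.reg .r12).toNat = k
  /-- never written by `mem_read` -/
  r14 : v.reg .r14 = u.reg .r14
  /-- never written by `mem_read` -/
  r15 : v.reg .r15 = u.reg .r15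
  /-- `push r13` (0x105c60) -/
  s13 : UInt64.ofNat (v.mem.readLE (u.reg .rsp - 8) 8) = u.reg .r13
  /-- `push r12` (0x105c62) -/
  s12 : UInt64.ofNat (v.mem.readLE (u.reg .rsp - 16) 8) = u.reg .r12
  /-- `push rbp` (0x105c64) -/
  sbp : UInt64.ofNat (v.mem.readLE (u.reg .rsp - 24) 8) = u.reg .rbp
  /-- `push rbx` (0x105c65) -/
  sbx : UInt64.ofNat (v.mem.readLE (u.reg .rsp - 32) 8) = u.reg .rbx
  /-- the return address -/
  sra : UInt64.ofNat (v.mem.readLE (u.reg .rsp) 8) = ret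
  /-- the footprint so far: the stack and the buffer -/
  same : Mem.SameExcept [⟨(u.reg .rsp).toNat - 128, (u.reg .rsp).toNat⟩,
    ⟨(u.reg .rsi).toNat, (u.reg .rsi).toNat + n⟩] u.mem v.mem
  /-- no store went to the shadow, and `memcpy` wrote none -/
  untouched : ShadowUntouched u.mem v.mem
  /-- the image's text is that of the reference state -/
  code : Mem.EqOn ProgX.Base.L.textLo ProgX.Base.L.textHi u₀.mem v.mem
  /-- DF = 0 -/
  df : v.flags .df = false
  /-- the SSE exceptions are masked -/
  mx : v.mxcsr &&& 0x1F80 = 0x1F80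
  /-- `count != 0` -/
  kpos : 1 ≤ k
  /-- `count ≤ len` -/
  kn : k ≤ n
  /-- `count ≤ end − cur` -/
  krem : k ≤ rem R u.mem
  /-- a short read exhausts the input -/
  kshort : k < n → k = rem R u.mem

/-! ### Part 2: the walk -/

/-- **0x105c60 … 0x105cc9, `call memcpy`, 0x105cce (ret4); or … 0x105cc2, the `ret`** (gif_driver.c:42-54). Four pushes; the three checked
8-byte loads `c = gif->UserData` (inside gif: `Shape.user`), `c->end`, `c->cur` (inside the cursor object: `Ctx.cursor_live`);
`avail = end − cur`; `len <= 0` is dead (`1 ≤ n < 2 ^ 31`); `count = min(len, avail)`. `count == 0` (the input is exhausted): the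
epilogue at once, `k = 0`, nothing but stack was written. Otherwise `memcpy(buf, c->cur, count)`: the source is input
(`Ctx.input_live`, `CursorOK`), the destination a sub-window of the caller's buffer (`LiveIn.sub`), the input lies below 700000H and the
buffer at or above it (`Ctx.input_range`, `BufOK.high`): no overlap. -/
theorem mr_seg_entry (Lay : Layout) (hLay : Lay.hi = 0x1000000) (μ : Microarch) (hμ : UserX.MicroOK μ) (u₀ : State)
    (hcode : HasCodeNat Lay u₀ Gif.L.mem_read.entry Gif.Code.code_mem_read.nat Gif.L.mem_read.size)
    (h_load8 : Asan.SmallCheck Lay μ ProgX.Base.WayInv (ProgX.Base.CodeOK u₀) [.rax, .rcx, .rdx] 8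
      ProgX.Base.L.__asan_load8_noabort.entry)
    (H : Heap) (rest : List Obj) (frames : List (Nat × FrameLayout)) (F : Forest) (R : Rd) (n : Nat) (u : State) (ret : Word)
    (hcpy : Calls Lay μ ProgX.Base.WayInv (ProgX.Base.conv u₀) ProgX.Base.L.memcpy.entry
      (ProgX.Base.Spec.memcpy.spec (H.liveObjs ++ rest) frames))
    (he : AtEntry (ProgX.Base.conv u₀) Gif.L.mem_read.entry (mem_read.spec H rest frames F R n).frame ret u)
    (hpre : (mem_read.spec H rest frames F R n).pre u) :
    ReachVia Lay μ ProgX.Base.WayInv u (fun w =>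
      (∃ k, MrMid F R n u₀ u ret k w) ∨ Returned (ProgX.Base.conv u₀) (mem_read.spec H rest frames F R n) u ret w) := by
  v_entry he
  obtain ⟨henv, hrdi, hn, hn1, hn2, hbuf⟩ := hpre
  have hp := henv.heap
  have hok := henv.ok
  have hbase := hp.base
  have hlimit := hp.limit
  -- where gif, the cursor and the buffer are
  have hgin := hok.owns.inside hp.inv.heap (o := (F.gif, 120)) List.mem_cons_self
  simp only at hgin
  rw [hbase] at hgin
  have hcur := henv.ctx.cursor_range hp.inv.shadow
  have hbw := hbuf.live.where_ hp.inv.shadow hp.shadowPre.offText (by omega)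
  have hbhigh := hbuf.high
  -- the three loads, as facts about the entry memory in the walker's form; `c = c->cur`, `e = c->end` as numbers
  have huser := hok.shape.user
  simp only [gfield] at huser
  have l_user : u.mem.readLE (u.reg .rdi + 0x68) 8 = R.cur := by
    rw [rd_eq_readLE u.mem (u.reg .rdi + 0x68) (F.gif + 104) 8 (by u_omega)]
    exact huser
  have hrem : rem R u.mem = mem_cursor.end u.mem R.cur - mem_cursor.cur u.mem R.cur := rfl
  obtain ⟨c, hc⟩ : ∃ c, mem_cursor.cur u.mem R.cur = c := ⟨_, rfl⟩
  obtain ⟨e, hce⟩ : ∃ e, mem_cursor.end u.mem R.cur = e := ⟨_, rfl⟩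
  have hcok : R.inB ≤ c ∧ c ≤ e ∧ e = R.inB + R.inN := by
    rw [← hc, ← hce]
    exact ⟨hok.shape.cursor.lo, hok.shape.cursor.le, hok.shape.cursor.hi⟩
  rw [hc, hce] at hrem
  have hc' := hc
  simp only [gfield] at hc hce
  have hclt : c < 2 ^ 64 := by
    have := Mem.readLE_lt u.mem (UInt64.ofNat R.cur) 8
    rw [← hc, rd_def]
    omega
  have helt : e < 2 ^ 64 := by
    have := Mem.readLE_lt u.mem (UInt64.ofNat (R.cur + 8)) 8
    rw [← hce, rd_def]
    omega
  have l_end : u.mem.readLE (UInt64.ofNat R.cur + 8) 8 = e := by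
    rw [rd_eq_readLE u.mem (UInt64.ofNat R.cur + 8) (R.cur + 8) 8 (by u_omega)]
    exact hce
  have l_cur : u.mem.readLE (UInt64.ofNat R.cur) 8 = c := by
    rw [rd_eq_readLE u.mem (UInt64.ofNat R.cur) R.cur 8 (by u_omega)]
    exact hc
  -- `len` as a number: `ebx`, and its sign extension
  have hlen32 : (Word.part .w32 (u.reg .rdx)).toNat = n := by
    rw [toNat_part32]
    exact hn
  have hlen64 : (BitVec.signExtend 64 (Word.part .w32 (u.reg .rdx))).toNat = n := by
    rw [mr_sext _ (by omega)]
    exact hlen32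
  have hmsb : (Word.part .w32 (u.reg .rdx)).msb = false := mr_msb _ (by omega)
  have hlenw : (Word.ofBV (BitVec.signExtend 64 (Word.part .w32 (u.reg .rdx)))).toNat = n := by
    rw [mr_toNat_ofBV64]
    exact hlen64
  -- `avail = end − cur` as a number
  have havail : (UInt64.ofNat e - UInt64.ofNat c).toNat = e - c := by u_omega
  u_walk hcode [hμ.vendor] until [Gif.L.mem_read.ret4] span [ProgX.Base.L.textLo, ProgX.Base.L.textHi] side (v_side)
  case check_105c76 =>
    -- gif_driver.c:43 `gif->UserData`: 8 bytes at gif + 104, inside gif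
    have hun : ShadowUntouched u.mem s_105c76.mem := by v_untouched
    have hl : LiveIn (H.liveObjs ++ rest) frames F.gif 120 := hok.gif_live.liveIn rest frames (Nat.le_refl _) (Nat.le_refl _)
    exact hl.accSmall hp.inv.shadow hun _ 8 (by decide) (by u_omega) (by u_omega)
  case check_105c83 =>
    -- gif_driver.c:44 `c->end`: 8 bytes at the cursor + 8
    have hun : ShadowUntouched u.mem s_105c83.mem := by v_untouched
    have hl : LiveIn (H.liveObjs ++ rest) frames R.cur 16 :=
      henv.ctx.cursor_live (H.liveObjs ++ rest) (Nat.le_refl _) (Nat.le_refl _)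
    exact hl.accSmall hp.inv.shadow hun _ 8 (by decide) (by u_omega) (by u_omega)
  case check_105c8f =>
    -- gif_driver.c:44 `c->cur`: 8 bytes at the cursor
    have hun : ShadowUntouched u.mem s_105c8f.mem := by v_untouched
    have hl : LiveIn (H.liveObjs ++ rest) frames R.cur 16 :=
      henv.ctx.cursor_live (H.liveObjs ++ rest) (Nat.le_refl _) (Nat.le_refl _)
    exact hl.accSmall hp.inv.shadow hun _ 8 (by decide) (by u_omega) (by u_omega)
  case call_inv =>
    v_inv
  case pre_105cc9 =>
    -- `count = avail < len`
    have hun : ShadowUntouched u.mem s_105cc9.mem := by v_untouched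
    refine mr_memcpy_pre henv hbuf hun ?_ ?_ ?_ ?_ w_rdi (k := e - c) ?_ ?_ ?_ ?_
    · rw [w_rsp]
      u_omega
    · rw [w_rsp]
      u_omega
    · rw [w_rsp]
      u_omega
    · rw [w_rsi, hc']
      u_omega
    · rw [w_rdx]
      exact havail
    · omega
    · omega
    · omega
  case call_inv =>
    v_inv
  case pre_105cc9 =>
    -- `count = len ≤ avail`
    have hun : ShadowUntouched u.mem s_105cc9.mem := by v_untouched
    refine mr_memcpy_pre henv hbuf hun ?_ ?_ ?_ ?_ w_rdi (k := n) ?_ ?_ ?_ ?_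
    · rw [w_rsp]
      u_omega
    · rw [w_rsp]
      u_omega
    · rw [w_rsp]
      u_omega
    · rw [w_rsi, hc']
      u_omega
    · rw [w_rdx]
      exact hlenw
    · omega
    · omega
    · omega
  case cont =>
    -- 0x105ca0 `jle` taken, `len <= 0` (gif_driver.c:46): dead, `1 ≤ n < 2 ^ 31`
    exfalso
    rcases hbr_105ca0 with h0 | hm
    · omega
    · rw [hmsb] at hm
      exact absurd hm (by decide)
  case cont =>
    -- 0x105cce (ret4): `memcpy` has returned; `count = avail < len`
    have hunc : ShadowUntouched s_105cc9.mem s_105cc9r.mem := w_post.2.1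
    clear w_post
    have hun0 : ShadowUntouched u.mem s_105cc9.mem := by
      rw [w_mem_105cc9]
      v_untouched
    v_after_call w_rsp_105cc9 w_mem_105cc9
    simp only [w_rdi_105cc9, w_rdx_105cc9] at w_same
    -- the stack slots: through memcpy's footprint (its own frame and the buffer)
    have hp13 : UInt64.ofNat (s_105cc9.mem.readLE (u.reg .rsp - 8) 8) = u.reg .r13 := by u_resolve
    rw [w_mem_105cc9] at hp13
    have hs13 : UInt64.ofNat (s_105cc9r.mem.readLE (u.reg .rsp - 8) 8) = u.reg .r13 := by u_frame hp13
    have hp12 : UInt64.ofNat (s_105cc9.mem.readLE (u.reg .rsp - 16) 8) = u.reg .r12 := by u_resolve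
    rw [w_mem_105cc9] at hp12
    have hs12 : UInt64.ofNat (s_105cc9r.mem.readLE (u.reg .rsp - 16) 8) = u.reg .r12 := by u_frame hp12
    have hpbp : UInt64.ofNat (s_105cc9.mem.readLE (u.reg .rsp - 24) 8) = u.reg .rbp := by u_resolve
    rw [w_mem_105cc9] at hpbp
    have hsbp : UInt64.ofNat (s_105cc9r.mem.readLE (u.reg .rsp - 24) 8) = u.reg .rbp := by u_frame hpbp
    have hpbx : UInt64.ofNat (s_105cc9.mem.readLE (u.reg .rsp - 32) 8) = u.reg .rbx := by u_resolve
    rw [w_mem_105cc9] at hpbx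
    have hsbx : UInt64.ofNat (s_105cc9r.mem.readLE (u.reg .rsp - 32) 8) = u.reg .rbx := by u_frame hpbx
    have hpra : UInt64.ofNat (s_105cc9.mem.readLE (u.reg .rsp) 8) = ret := by u_resolve
    rw [w_mem_105cc9] at hpra
    have hsra : UInt64.ofNat (s_105cc9r.mem.readLE (u.reg .rsp) 8) = ret := by u_frame hpra
    have hsame : Mem.SameExcept [⟨(u.reg .rsp).toNat - 128, (u.reg .rsp).toNat⟩,
        ⟨(u.reg .rsi).toNat, (u.reg .rsi).toNat + n⟩] u.mem s_105cc9r.mem := by u_same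
    refine ReachVia.done (Or.inl ⟨e - c, ⟨w_rip, w_rsp, w_rbp, ?_, w_kept.get .r14 rfl, w_kept.get .r15 rfl, hs13, hs12, hsbp, hsbx,
      hsra, hsame, hun0.trans hunc, w_eq, w_df, w_mx, ?_, ?_, ?_, ?_⟩⟩)
    · rw [w_r12]
      exact havail
    · omega
    · omega
    · omega
    · intro _
      omega
  case cont =>
    -- `count = avail = 0`: the input is exhausted (gif_driver.c:53); 0x105cb5 … 0x105cc2: `return 0`
    refine ReachVia.done (Or.inr ?_)
    have hun : ShadowUntouched u.mem s_105cc2.mem := by v_untouched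
    have hsame0 : Mem.SameExcept [⟨(u.reg .rsp).toNat - 128, (u.reg .rsp).toNat⟩] u.mem s_105cc2.mem := by u_same
    have hsame3 : Mem.SameExcept [⟨(u.reg .rsp).toNat - 128, (u.reg .rsp).toNat⟩,
        ⟨(u.reg .rsi).toNat, (u.reg .rsi).toNat + n⟩, ⟨R.cur, R.cur + 8⟩] u.mem s_105cc2.mem := by u_same
    -- nothing but stack below the cursor was written: the cursor is as it was
    have hoff : ∀ w, w ∈ [(⟨(u.reg .rsp).toNat - 128, (u.reg .rsp).toNat⟩ : Span)] → w.hi ≤ R.cur ∨ R.cur + 16 ≤ w.lo := by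
      intro w hw
      have ew : w = ⟨(u.reg .rsp).toNat - 128, (u.reg .rsp).toNat⟩ := List.mem_singleton.mp hw
      subst ew
      simp only
      omega
    have hcur' : CursorOK R s_105cc2.mem := hok.shape.cursor.sameExcept hsame0 (by omega) hoff
    have hrem' : rem R s_105cc2.mem = rem R u.mem := rem_sameExcept hsame0 (by omega) hoff
    v_returned
    refine ⟨0, Nat.zero_le _, Nat.zero_le _, ?_, ?_, ?_, ?_⟩
    · intro _
      omega
    · rw [w_rax, toNat_ofBV32, toNat_part32]
      u_omega
    · rw [hrem']
      omega
    · exact mr_back henv hbuf he_room hun hsame3 hcur' (by omega)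
  case cont =>
    -- 0x105cce (ret4): `memcpy` has returned; `count = len ≤ avail`
    have hunc : ShadowUntouched s_105cc9.mem s_105cc9r.mem := w_post.2.1
    clear w_post
    have hun0 : ShadowUntouched u.mem s_105cc9.mem := by
      rw [w_mem_105cc9]
      v_untouched
    v_after_call w_rsp_105cc9 w_mem_105cc9
    simp only [w_rdi_105cc9, w_rdx_105cc9] at w_same
    -- the stack slots: through memcpy's footprint (its own frame and the buffer)
    have hp13 : UInt64.ofNat (s_105cc9.mem.readLE (u.reg .rsp - 8) 8) = u.reg .r13 := by u_resolve
    rw [w_mem_105cc9] at hp13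
    have hs13 : UInt64.ofNat (s_105cc9r.mem.readLE (u.reg .rsp - 8) 8) = u.reg .r13 := by u_frame hp13
    have hp12 : UInt64.ofNat (s_105cc9.mem.readLE (u.reg .rsp - 16) 8) = u.reg .r12 := by u_resolve
    rw [w_mem_105cc9] at hp12
    have hs12 : UInt64.ofNat (s_105cc9r.mem.readLE (u.reg .rsp - 16) 8) = u.reg .r12 := by u_frame hp12
    have hpbp : UInt64.ofNat (s_105cc9.mem.readLE (u.reg .rsp - 24) 8) = u.reg .rbp := by u_resolve
    rw [w_mem_105cc9] at hpbp
    have hsbp : UInt64.ofNat (s_105cc9r.mem.readLE (u.reg .rsp - 24) 8) = u.reg .rbp := by u_frame hpbp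
    have hpbx : UInt64.ofNat (s_105cc9.mem.readLE (u.reg .rsp - 32) 8) = u.reg .rbx := by u_resolve
    rw [w_mem_105cc9] at hpbx
    have hsbx : UInt64.ofNat (s_105cc9r.mem.readLE (u.reg .rsp - 32) 8) = u.reg .rbx := by u_frame hpbx
    have hpra : UInt64.ofNat (s_105cc9.mem.readLE (u.reg .rsp) 8) = ret := by u_resolve
    rw [w_mem_105cc9] at hpra
    have hsra : UInt64.ofNat (s_105cc9r.mem.readLE (u.reg .rsp) 8) = ret := by u_frame hpra
    have hsame : Mem.SameExcept [⟨(u.reg .rsp).toNat - 128, (u.reg .rsp).toNat⟩,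
        ⟨(u.reg .rsi).toNat, (u.reg .rsi).toNat + n⟩] u.mem s_105cc9r.mem := by u_same
    refine ReachVia.done (Or.inl ⟨n, ⟨w_rip, w_rsp, w_rbp, ?_, w_kept.get .r14 rfl, w_kept.get .r15 rfl, hs13, hs12, hsbp, hsbx,
      hsra, hsame, hun0.trans hunc, w_eq, w_df, w_mx, ?_, ?_, ?_, ?_⟩⟩)
    · rw [w_r12]
      exact hlenw
    · omega
    · omega
    · omega
    · intro hlt
      omega

/-- **0x105cce (ret4) … 0x105cc2, the `ret`** (gif_driver.c:55-58): the checked read-modify-write `c->cur += count` (8 bytes at the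
cursor: `Ctx.cursor_live`; `memcpy` wrote the buffer and its stack only, the cursor still holds `cur`), `return (int) count`
(`mov eax, r12d`: zero-extended), the epilogue. The post: `k = count`; the new `CursorOK` (`cur + k ≤ end`); `Back` by `mr_back`. -/
theorem mr_seg_ret4 (Lay : Layout) (hLay : Lay.hi = 0x1000000) (μ : Microarch) (hμ : UserX.MicroOK μ) (u₀ : State)
    (hcode : HasCodeNat Lay u₀ Gif.L.mem_read.entry Gif.Code.code_mem_read.nat Gif.L.mem_read.size)
    (h_load8 : Asan.SmallCheck Lay μ ProgX.Base.WayInv (ProgX.Base.CodeOK u₀) [.rax, .rcx, .rdx] 8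
      ProgX.Base.L.__asan_load8_noabort.entry)
    (H : Heap) (rest : List Obj) (frames : List (Nat × FrameLayout)) (F : Forest) (R : Rd) (n : Nat) (u : State) (ret : Word)
    (he : AtEntry (ProgX.Base.conv u₀) Gif.L.mem_read.entry (mem_read.spec H rest frames F R n).frame ret u)
    (hpre : (mem_read.spec H rest frames F R n).pre u) (k : Nat) (v : State)
    (hat : MrMid F R n u₀ u ret k v) :
    ReachVia Lay μ ProgX.Base.WayInv v (Returned (ProgX.Base.conv u₀) (mem_read.spec H rest frames F R n) u ret) := by
  v_entry he
  obtain ⟨henv, hrdi, hn, hn1, hn2, hbuf⟩ := hpre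
  have hp := henv.heap
  have hok := henv.ok
  have hbase := hp.base
  have hlimit := hp.limit
  have hcur := henv.ctx.cursor_range hp.inv.shadow
  have hboff := mr_loose_off_cursor hok hp.inv.heap ⟨hcur.1, hcur.2.1⟩ hbuf.loose
  simp only at hboff
  -- `c = c->cur`, `e = c->end` at the entry, as numbers
  have hrem : rem R u.mem = mem_cursor.end u.mem R.cur - mem_cursor.cur u.mem R.cur := rfl
  obtain ⟨c, hc⟩ : ∃ c, mem_cursor.cur u.mem R.cur = c := ⟨_, rfl⟩
  obtain ⟨e, hce⟩ : ∃ e, mem_cursor.end u.mem R.cur = e := ⟨_, rfl⟩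
  have hcok : R.inB ≤ c ∧ c ≤ e ∧ e = R.inB + R.inN := by
    rw [← hc, ← hce]
    exact ⟨hok.shape.cursor.lo, hok.shape.cursor.le, hok.shape.cursor.hi⟩
  rw [hc, hce] at hrem
  simp only [gfield] at hc hce
  have hclt : c < 2 ^ 64 := by
    have := Mem.readLE_lt u.mem (UInt64.ofNat R.cur) 8
    rw [← hc, rd_def]
    omega
  have helt : e < 2 ^ 64 := by
    have := Mem.readLE_lt u.mem (UInt64.ofNat (R.cur + 8)) 8
    rw [← hce, rd_def]
    omega
  have l_cur : u.mem.readLE (UInt64.ofNat R.cur) 8 = c := by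
    rw [rd_eq_readLE u.mem (UInt64.ofNat R.cur) R.cur 8 (by u_omega)]
    exact hc
  have l_end : u.mem.readLE (UInt64.ofNat R.cur + 8) 8 = e := by
    rw [rd_eq_readLE u.mem (UInt64.ofNat R.cur + 8) (R.cur + 8) 8 (by u_omega)]
    exact hce
  -- the state at the cut, under the names the walker reads; `r12 = count` as a variable
  obtain ⟨w_rip, c_rsp, c_rbp, hr12, c_r14, c_r15, k_r13, k_r12, k_rbp, k_rbx, k_ra, hsame, hunv, w_eq, hdf, hmx, hk1, hkn, hkr,
    hkshort⟩ := hat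
  obtain ⟨x, c_r12⟩ : ∃ x, v.reg .r12 = x := ⟨_, rfl⟩
  rw [c_r12] at hr12
  rw [hrem] at hkr hkshort
  have w_kept : RegsKept [.rsp] v v := RegsKept.refl _ _
  have hsse : SseOK v := ProgX.Base.sseOK_of_abiInv ⟨hdf, hmx⟩
  -- the cursor through the footprint so far (the stack below it, the buffer off it)
  have k_cur : v.mem.readLE (UInt64.ofNat R.cur) 8 = c := by u_frame l_cur
  have k_end : v.mem.readLE (UInt64.ofNat R.cur + 8) 8 = e := by u_frame l_end
  u_walk hcode [hμ.vendor] span [ProgX.Base.L.textLo, ProgX.Base.L.textHi] side (v_side)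
  case check_105cd1 =>
    -- gif_driver.c:55 `c->cur += count`: 8 bytes at the cursor; `memcpy` wrote no shadow byte
    have hun1 : ShadowUntouched v.mem s_105cd1.mem := by v_untouched
    have hl : LiveIn (H.liveObjs ++ rest) frames R.cur 16 :=
      henv.ctx.cursor_live (H.liveObjs ++ rest) (Nat.le_refl _) (Nat.le_refl _)
    exact hl.accSmall hp.inv.shadow (hunv.trans hun1) _ 8 (by decide) (by u_omega) (by u_omega)
  -- 0x105cc2: the `ret` has been executed
  refine ReachVia.done ?_
  -- the value stored into `c->cur`: `cur + k`
  have hval : (BitVec.ofNat 64 c + x.toBitVec).toNat = c + k := by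
    rw [mr_add_val c x (by omega), hr12]
  rw [hval] at w_mem
  have hun2 : ShadowUntouched v.mem s_105cc2.mem := by v_untouched
  have hsame3 : Mem.SameExcept [⟨(u.reg .rsp).toNat - 128, (u.reg .rsp).toNat⟩,
      ⟨(u.reg .rsi).toNat, (u.reg .rsi).toNat + n⟩, ⟨R.cur, R.cur + 8⟩] u.mem s_105cc2.mem := by
    rw [w_mem]
    u_same
  -- the cursor at the end: `cur' = cur + k`, `end' = end`
  have hcur_new : mem_cursor.cur s_105cc2.mem R.cur = c + k := by
    simp only [gfield]
    rw [w_mem, rd_writeLE_same _ _ 8 _ R.cur (by u_omega) (by omega)]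
    omega
  have hend_new : mem_cursor.end s_105cc2.mem R.cur = e := by
    simp only [gfield]
    rw [← rd_eq_readLE s_105cc2.mem (UInt64.ofNat R.cur + 8) (R.cur + 8) 8 (by u_omega)]
    u_frame k_end
  have hcok_new : CursorOK R s_105cc2.mem := by
    refine ⟨?_, ?_, ?_⟩
    · rw [hcur_new]
      omega
    · rw [hcur_new, hend_new]
      omega
    · rw [hend_new]
      exact hcok.2.2
  have hrem_new : rem R s_105cc2.mem = e - c - k := by
    unfold rem
    rw [hcur_new, hend_new]
    omega
  refine X86.User.Returned.mk w_rip w_rsp ?_ ?_ (ProgX.Base.conv_code_in w_eq) ?_ ?_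
  · -- saved: rbx, rbp, r12, r13 popped back; r14, r15 never written
    intro r hr
    cases r <;> first
      | exact absurd hr (by decide)
      | (with_reducible assumption)
      | exact (w_kept _ rfl).trans c_r14
      | exact (w_kept _ rfl).trans c_r15
  · -- same: the stack, the buffer, `c->cur`
    simp only [X86.User.Spec.footprint, vspec]
    exact hsame3
  · v_inv
  · -- the post: `k = count`
    refine ⟨k, hkn, ?_, ?_, ?_, ?_, ?_⟩
    · rw [hrem]
      exact hkr
    · rw [hrem]
      exact hkshort
    · rw [w_rax, toNat_ofBV32, toNat_part32, hr12]
      exact Nat.mod_eq_of_lt (by omega)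
    · rw [hrem_new, hrem]
    · exact mr_back henv hbuf he_room (hunv.trans hun2) hsame3 hcok_new (by rw [hrem_new, hrem]; omega)

end Gif.Spec.mem_read
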